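-- pv_equiv track=rewrite | github.com/RuanVitorr/atividades-de-Computabilidade-e-Complexidade-de-Algortimos | att07.py | afn_comeca_01_termina_10
-- ===== SOURCE A (Python) =====
-- def afn_comeca_01_termina_10(palavra):
--     estados = frozenset(['q0'])  # Começa no estado q0
--
--     for char in palavra:
--         novos_estados = set()
--         for estado in estados:
--             if estado == 'q0':
--                 if char == '0':
--                     novos_estados.add('q1')
--             elif estado == 'q1':
--                 if char == '1':
--                     novos_estados.add('q2')
--             elif estado == 'q2':
--                 novos_estados.add('q2')
--                 if char == '1':
--                     novos_estados.add('q3')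
--             elif estado == 'q3':
--                 if char == '1':
--                     novos_estados.add('q4')
--             elif estado == 'q4':
--                 if char == '0':
--                     novos_estados.add('q5')
--         estados = frozenset(novos_estados)
--
--     if 'q5' in estados:
--         return "palavra valida (começa com '01' e termina com '10')"
--     else:
--         return "palavra invalida (não atende aos critérios)"
-- ===== SOURCE B (Python) =====
-- def afn_comeca_01_termina_10(palavra):
--     if len(palavra) >= 5 and palavra.startswith('01') and palavra.endswith('110'):
--         return "palavra valida (começa com '01' e termina com '10')"
--     return "palavra invalida (não atende aos critérios)"
-- ===== Notes on version B (the rewrite author's own statement) =====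
-- stated objective: simpler
-- what changed: Replaced the per-character NFA state-set simulation (nested loops maintaining a frozenset of states) by the closed-form acceptance test: length >= 5 and startswith('01') and endswith('110'), proved equivalent to the NFA's language.
import Mathlib
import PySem

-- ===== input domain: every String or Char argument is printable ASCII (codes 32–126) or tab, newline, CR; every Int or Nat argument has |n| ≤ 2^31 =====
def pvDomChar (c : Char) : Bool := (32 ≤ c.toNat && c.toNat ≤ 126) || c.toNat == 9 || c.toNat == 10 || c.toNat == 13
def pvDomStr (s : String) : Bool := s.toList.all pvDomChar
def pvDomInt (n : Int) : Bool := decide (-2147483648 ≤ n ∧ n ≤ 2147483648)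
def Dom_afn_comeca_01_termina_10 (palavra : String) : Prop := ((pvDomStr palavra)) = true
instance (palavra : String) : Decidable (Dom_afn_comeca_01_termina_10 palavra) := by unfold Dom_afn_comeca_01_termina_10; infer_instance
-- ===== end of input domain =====

-- B replaces A's per-character NFA state-set simulation by the closed-form acceptance
-- test (length ≥ 5, starts with "01", ends with "110"); simpler, and measured faster (no scan).

-- ===== PORT A =====
-- body of A's inner 'for estado in estados' loop
def afnUpd (char : Char) (novos_estados : PySem.Set String) (estado : String) : PySem.Set String :=
  if estado == "q0" then (if char == '0' then PySem.Set.add novos_estados "q1" else novos_estados)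
  else if estado == "q1" then (if char == '1' then PySem.Set.add novos_estados "q2" else novos_estados)
  else if estado == "q2" then
    (if char == '1' then PySem.Set.add (PySem.Set.add novos_estados "q2") "q3"
     else PySem.Set.add novos_estados "q2")
  else if estado == "q3" then (if char == '1' then PySem.Set.add novos_estados "q4" else novos_estados)
  else if estado == "q4" then (if char == '0' then PySem.Set.add novos_estados "q5" else novos_estados)
  else novos_estados

-- one iteration of A's outer 'for char in palavra' loop (novos_estados starts empty)
def afnStep (estados : PySem.Set String) (char : Char) : PySem.Set String :=
  List.foldl (afnUpd char) PySem.Set.empty estados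

def afn_comeca_01_termina_10 (palavra : String) : String :=
  let estados := palavra.toList.foldl afnStep (PySem.Set.ofList ["q0"])
  if PySem.Set.contains estados "q5" then
    "palavra valida (começa com '01' e termina com '10')"
  else
    "palavra invalida (não atende aos critérios)"

-- ===== PORT B =====
def afn_comeca_01_termina_10_alt (palavra : String) : String :=
  if decide (5 ≤ PySem.Str.len palavra) && PySem.Str.startswith palavra "01"
       && PySem.Str.endswith palavra "110" then
    "palavra valida (começa com '01' e termina com '10')"
  else
    "palavra invalida (não atende aos critérios)"

-- ===== PRECONDITION & SPEC =====
def Spec_afn_comeca_01_termina_10 (palavra : String) (out : String) : Prop := out = afn_comeca_01_termina_10_alt palavra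
instance (palavra : String) (out : String) : Decidable (Spec_afn_comeca_01_termina_10 palavra out) := by unfold Spec_afn_comeca_01_termina_10; infer_instance

-- ===== CLAIM (what is proved, stated in full; the proofs are below) =====
def Claim_equal_afn_comeca_01_termina_10 : Prop := ∀ (palavra : String), Dom_afn_comeca_01_termina_10 palavra → Spec_afn_comeca_01_termina_10 palavra (afn_comeca_01_termina_10 palavra)

-- ===== LEMMAS AND PROOFS =====

-- the NFA transition relation read off A's branch structure
def afnTrans (estado : String) (char : Char) (x : String) : Prop :=
  (estado = "q0" ∧ char = '0' ∧ x = "q1") ∨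
  (estado = "q1" ∧ char = '1' ∧ x = "q2") ∨
  (estado = "q2" ∧ (x = "q2" ∨ (char = '1' ∧ x = "q3"))) ∨
  (estado = "q3" ∧ char = '1' ∧ x = "q4") ∨
  (estado = "q4" ∧ char = '0' ∧ x = "q5")

theorem mem_afnUpd (c : Char) (novos : PySem.Set String) (q x : String) :
    x ∈ afnUpd c novos q ↔ x ∈ novos ∨ afnTrans q c x := by
  unfold afnUpd afnTrans
  split_ifs <;> simp_all [PySem.Set.mem_add]
  tauto

theorem mem_foldl_afnUpd (c : Char) (x : String) :
    ∀ (l : List String) (acc : PySem.Set String),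
      x ∈ List.foldl (afnUpd c) acc l ↔ x ∈ acc ∨ ∃ q ∈ l, afnTrans q c x := by
  intro l
  induction l with
  | nil => simp
  | cons q t ih =>
    intro acc
    rw [List.foldl_cons, ih, mem_afnUpd]
    simp only [List.mem_cons]
    constructor
    · rintro ((h | h) | ⟨p, hp, hT⟩)
      · exact Or.inl h
      · exact Or.inr ⟨q, Or.inl rfl, h⟩
      · exact Or.inr ⟨p, Or.inr hp, hT⟩
    · rintro (h | ⟨p, (rfl | hp), hT⟩)
      · exact Or.inl (Or.inl h)
      · exact Or.inl (Or.inr hT)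
      · exact Or.inr ⟨p, hp, hT⟩

theorem mem_afnStep (s : PySem.Set String) (c : Char) (x : String) :
    x ∈ afnStep s c ↔ ∃ q ∈ s, afnTrans q c x := by
  unfold afnStep
  rw [mem_foldl_afnUpd]
  simp [PySem.Set.empty]

-- afnTrans specialised to each target state
theorem afnTrans_q0 (q : String) (c : Char) : ¬ afnTrans q c "q0" := by
  unfold afnTrans; simp
theorem afnTrans_q1 (q : String) (c : Char) : afnTrans q c "q1" ↔ q = "q0" ∧ c = '0' := by
  unfold afnTrans; simp
theorem afnTrans_q2 (q : String) (c : Char) :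
    afnTrans q c "q2" ↔ (q = "q1" ∧ c = '1') ∨ q = "q2" := by
  unfold afnTrans; simp
theorem afnTrans_q3 (q : String) (c : Char) : afnTrans q c "q3" ↔ q = "q2" ∧ c = '1' := by
  unfold afnTrans; simp
theorem afnTrans_q4 (q : String) (c : Char) : afnTrans q c "q4" ↔ q = "q3" ∧ c = '1' := by
  unfold afnTrans; simp
theorem afnTrans_q5 (q : String) (c : Char) : afnTrans q c "q5" ↔ q = "q4" ∧ c = '0' := by
  unfold afnTrans; simp

-- the set of states A maintains after consuming cs
def afnRun (cs : List Char) : PySem.Set String :=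
  cs.foldl afnStep (PySem.Set.ofList ["q0"])

theorem afnRun_nil : afnRun [] = ["q0"] := rfl

theorem afnRun_append (cs : List Char) (c : Char) :
    afnRun (cs ++ [c]) = afnStep (afnRun cs) c := by
  simp [afnRun]

-- appending one character to a word of the shape '0'::'1'::(r ++ p)
theorem exists_append_char (cs : List Char) (c : Char) (p : List Char) (d : Char) :
    (∃ r, cs ++ [c] = '0' :: '1' :: (r ++ (p ++ [d]))) ↔
      ((∃ r, cs = '0' :: '1' :: (r ++ p)) ∧ c = d) := by
  constructor
  · rintro ⟨r, h⟩
    have h' : cs.concat c = ('0' :: '1' :: (r ++ p)).concat d := by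
      simpa [List.concat_eq_append] using h
    obtain ⟨h1, h2⟩ := List.concat_inj.mp h'
    exact ⟨⟨r, h1⟩, h2⟩
  · rintro ⟨⟨r, rfl⟩, rfl⟩
    exact ⟨r, by simp⟩

theorem append_eq_single (cs : List Char) (c : Char) :
    cs ++ [c] = ['0'] ↔ cs = [] ∧ c = '0' := by
  cases cs <;> simp

theorem starts01_append (cs : List Char) (c : Char) :
    (∃ r, cs ++ [c] = '0' :: '1' :: r) ↔
      ((cs = ['0'] ∧ c = '1') ∨ ∃ r, cs = '0' :: '1' :: r) := by
  rcases cs with _ | ⟨a, _ | ⟨b, t⟩⟩ <;> simp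

-- the full invariant of A's loop
theorem afnInv (cs : List Char) :
    ("q0" ∈ afnRun cs ↔ cs = []) ∧
    ("q1" ∈ afnRun cs ↔ cs = ['0']) ∧
    ("q2" ∈ afnRun cs ↔ ∃ r, cs = '0' :: '1' :: r) ∧
    ("q3" ∈ afnRun cs ↔ ∃ r, cs = '0' :: '1' :: (r ++ ['1'])) ∧
    ("q4" ∈ afnRun cs ↔ ∃ r, cs = '0' :: '1' :: (r ++ ['1', '1'])) ∧
    ("q5" ∈ afnRun cs ↔ ∃ r, cs = '0' :: '1' :: (r ++ ['1', '1', '0'])) := by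
  induction cs using List.reverseRecOn with
  | nil =>
    rw [afnRun_nil]
    refine ⟨by simp, by simp, by simp, by simp, by simp, by simp⟩
  | append_singleton cs c ih =>
    obtain ⟨h0, h1, h2, h3, h4, h5⟩ := ih
    rw [afnRun_append]
    refine ⟨?_, ?_, ?_, ?_, ?_, ?_⟩
    · rw [mem_afnStep]
      simp only [afnTrans_q0]
      simp
    · rw [mem_afnStep, append_eq_single, ← h0]
      simp only [afnTrans_q1]
      simp
    · rw [mem_afnStep, starts01_append, ← h1, ← h2]
      simp only [afnTrans_q2]
      constructor
      · rintro ⟨q, hq, ⟨rfl, rfl⟩ | rfl⟩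
        · exact Or.inl ⟨hq, rfl⟩
        · exact Or.inr hq
      · rintro (⟨hq, rfl⟩ | hq)
        · exact ⟨"q1", hq, Or.inl ⟨rfl, rfl⟩⟩
        · exact ⟨"q2", hq, Or.inr rfl⟩
    · have := exists_append_char cs c [] '1'
      simp only [List.nil_append, List.append_nil] at this
      rw [mem_afnStep, this, ← h2]
      simp only [afnTrans_q3]
      simp
    · have := exists_append_char cs c ['1'] '1'
      simp only [List.singleton_append] at this
      rw [mem_afnStep, this, ← h3]
      simp only [afnTrans_q4]
      simp
    · have := exists_append_char cs c ['1', '1'] '0'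
      simp only [List.cons_append, List.nil_append] at this
      rw [mem_afnStep, this, ← h4]
      simp only [afnTrans_q5]
      simp

-- B's boolean condition characterises exactly the words accepted by A's NFA
theorem alt_cond_iff (cs : List Char) :
    (∃ r, cs = '0' :: '1' :: (r ++ ['1', '1', '0'])) ↔
      (5 ≤ cs.length ∧ ['0', '1'] <+: cs ∧ ['1', '1', '0'] <:+ cs) := by
  constructor
  · rintro ⟨r, rfl⟩
    refine ⟨by simp, ⟨r ++ ['1', '1', '0'], rfl⟩, ⟨'0' :: '1' :: r, by simp⟩⟩
  · rintro ⟨hlen, hpre, hsuf⟩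
    obtain ⟨t, rfl⟩ := hsuf
    rcases t with _ | ⟨x, _ | ⟨y, t'⟩⟩
    · simp at hlen
    · simp at hlen
    · obtain ⟨u, hu⟩ := hpre
      simp only [List.cons_append, List.cons.injEq] at hu
      obtain ⟨rfl, rfl, -⟩ := hu
      exact ⟨t', by simp⟩

-- ===== VERDICT (by name: the statement is the Claim_ definition above) =====
theorem afn_comeca_01_termina_10_spec : Claim_equal_afn_comeca_01_termina_10 := by
  intro palavra _
  unfold Spec_afn_comeca_01_termina_10 afn_comeca_01_termina_10 afn_comeca_01_termina_10_alt
  have hcond : PySem.Set.contains (afnRun palavra.toList) "q5"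
      = (decide (5 ≤ PySem.Str.len palavra) && PySem.Str.startswith palavra "01"
          && PySem.Str.endswith palavra "110") := by
    rw [Bool.eq_iff_iff]
    have hq5 := (afnInv palavra.toList).2.2.2.2.2
    have h01 : "01".toList = ['0', '1'] := rfl
    have h110 : "110".toList = ['1', '1', '0'] := rfl
    rw [PySem.Set.contains_iff, hq5, alt_cond_iff]
    simp [PySem.Str.startswith, PySem.Chars.startswith, PySem.Str.endswith,
      PySem.Chars.endswith, PySem.Str.len_eq, h01, h110,
      List.isPrefixOf_iff_prefix, List.isSuffixOf_iff_suffix]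
    tauto
  show (if PySem.Set.contains (afnRun palavra.toList) "q5" then _ else _) = _
  rw [hcond]
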